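-- pv_equiv track=rewrite | github.com/FyodorovAleksej/COSI2 | engine.py | toPerim
-- ===== SOURCE A (Python) =====
-- def toPerim(__lines: list):
--     perim = 0
--     if len(__lines) >= 2:
--         perim += len(__lines[0])
--         perim += len(__lines[len(__lines) - 1])
--         for _ in range(1, len(__lines) - 1):
--             if len(__lines) >= 2:
--                 perim += 2
--     return perim
-- ===== SOURCE B (Python) =====
-- def toPerim(__lines: list):
--     n = len(__lines)
--     if n < 2:
--         return 0
--     return len(__lines[0]) + len(__lines[-1]) + 2 * (n - 2)
-- ===== Notes on version B (the rewrite author's own statement) =====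
-- stated objective: faster
-- what changed: Replaces the loop over the middle lines (adding 2 per iteration) with the closed form len(first)+len(last)+2*(n-2).
import Mathlib
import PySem

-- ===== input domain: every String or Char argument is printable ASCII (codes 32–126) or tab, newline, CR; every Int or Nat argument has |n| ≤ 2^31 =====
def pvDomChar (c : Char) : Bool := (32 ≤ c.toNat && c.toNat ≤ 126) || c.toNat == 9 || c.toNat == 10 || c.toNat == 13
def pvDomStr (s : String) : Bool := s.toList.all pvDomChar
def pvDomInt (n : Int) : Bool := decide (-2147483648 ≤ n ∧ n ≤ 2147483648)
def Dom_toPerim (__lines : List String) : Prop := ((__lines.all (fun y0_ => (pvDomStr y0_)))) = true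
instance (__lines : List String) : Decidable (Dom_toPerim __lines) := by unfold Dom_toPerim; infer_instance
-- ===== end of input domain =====

-- B replaces A's loop over the middle lines with the closed form len(first)+len(last)+2*(n-2): O(1) arithmetic instead of O(n) iteration.

-- ===== PORT A =====
def toPerim (__lines : List String) : Int :=
  let perim : Int := 0
  if (__lines.length : Int) ≥ 2 then
    let perim := perim + PySem.Str.len (PySem.List.pyGetD __lines (0 : Int) "")
    let perim := perim + PySem.Str.len (PySem.List.pyGetD __lines ((__lines.length : Int) - 1) "")
    (PySem.List.pyRange 1 ((__lines.length : Int) - 1) 1).foldl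
      (fun perim _ => if (__lines.length : Int) ≥ 2 then perim + 2 else perim) perim
  else perim

-- ===== PORT B =====
def toPerim_alt (__lines : List String) : Int :=
  let n : Int := __lines.length
  if n < 2 then 0
  else PySem.Str.len (PySem.List.pyGetD __lines (0 : Int) "")
       + PySem.Str.len (PySem.List.pyGetD __lines (-1 : Int) "")
       + 2 * (n - 2)

-- ===== PRECONDITION & SPEC =====
def Spec_toPerim (__lines : List String) (out : Int) : Prop := out = toPerim_alt __lines
instance (__lines : List String) (out : Int) : Decidable (Spec_toPerim __lines out) := by unfold Spec_toPerim; infer_instance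

-- ===== CLAIM (what is proved, stated in full; the proofs are below) =====
def Claim_equal_toPerim : Prop := ∀ (__lines : List String), Dom_toPerim __lines → Spec_toPerim __lines (toPerim __lines)

-- ===== LEMMAS AND PROOFS =====

-- ===== VERDICT (by name: the statement is the Claim_ definition above) =====
theorem toPerim_spec : Claim_equal_toPerim := by
  intro xs _
  unfold Spec_toPerim toPerim toPerim_alt
  by_cases h : (xs.length : Int) ≥ 2
  · simp only [h, if_pos, if_neg (by omega : ¬ (xs.length : Int) < 2)]
    have hlast : PySem.List.pyGetD xs ((xs.length : Int) - 1) "" = PySem.List.pyGetD xs (-1 : Int) "" := by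
      rw [PySem.List.pyGetD_neg_ofNat xs 1 "" (by omega) (by omega),
          show ((xs.length : Int) - 1) = ((xs.length - 1 : Nat) : Int) from by omega,
          PySem.List.pyGetD_natCast, List.getD_eq_getElem _ _ (by omega)]
    rw [show (fun (perim : Int) (_ : Int) => perim + 2)
          = (fun (acc : Int) (x : Int) => acc + (fun (_ : Int) => (2 : Int)) x) from rfl,
        PySem.List.foldl_add]
    rw [PySem.List.sum_map_const_int, PySem.List.length_pyRange_one, hlast]
    have : ((xs.length : Int) - 1 - 1).toNat = xs.length - 2 := by omega
    rw [this]
    push_cast [Nat.cast_sub (by omega : 2 ≤ xs.length)]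
    ring
  · have h2 : (xs.length : Int) < 2 := by omega
    simp [h, h2]
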